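-- pv_equiv track=rewrite | github.com/jaks19/evolving-robotic-gripper | ES_code/solver.py | group_jobs_for_workers
-- ===== SOURCE A (Python) =====
-- import math as m
--
-- def group_jobs_for_workers(models, num_workers):
--     assert num_workers <= len(models), f"Increase population size by {num_workers-len(models)} as some workers are idle"
--
--     batch_size = m.floor(len(models)/num_workers)
--     tail = len(models) - batch_size*num_workers
--
--     batches = []
--     idx = 0
--
--     for j in range(tail):
--         batch = []
--         for i in range(batch_size+1):
--             batch.append([idx, models.pop(0)])
--             idx += 1
--
--         batches.append(batch)
--
--     while len(models) > 0:
--         batch = []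
--         for i in range(batch_size):
--             batch.append([idx, models.pop(0)])
--             idx += 1
--
--         batches.append(batch)
--
--     return batches
-- ===== SOURCE B (Python) =====
-- import math as m
--
-- def group_jobs_for_workers(models, num_workers):
--     assert num_workers <= len(models), f"Increase population size by {num_workers-len(models)} as some workers are idle"
--
--     batch_size = m.floor(len(models)/num_workers)
--     tail = len(models) - batch_size*num_workers
--     sizes = [batch_size+1]*tail + [batch_size]*(num_workers-tail)
--     indexed = [[i, v] for i, v in enumerate(models)]
--
--     batches = []
--     idx = 0
--     for size in sizes:
--         batches.append(indexed[idx:idx+size])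
--         idx += size
--
--     models.clear()  # match A's destructive emptying of the input list
--     return batches
-- ===== Notes on version B (the rewrite author's own statement) =====
-- stated objective: faster
-- what changed: Replaces A's three nested destructive pop(0) loops (each pop shifts the whole list) by computing the batch-sizes list up front, enumerating the models once, and taking one slice per batch in a single loop (then clearing models to keep A's side effect).
import Mathlib
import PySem

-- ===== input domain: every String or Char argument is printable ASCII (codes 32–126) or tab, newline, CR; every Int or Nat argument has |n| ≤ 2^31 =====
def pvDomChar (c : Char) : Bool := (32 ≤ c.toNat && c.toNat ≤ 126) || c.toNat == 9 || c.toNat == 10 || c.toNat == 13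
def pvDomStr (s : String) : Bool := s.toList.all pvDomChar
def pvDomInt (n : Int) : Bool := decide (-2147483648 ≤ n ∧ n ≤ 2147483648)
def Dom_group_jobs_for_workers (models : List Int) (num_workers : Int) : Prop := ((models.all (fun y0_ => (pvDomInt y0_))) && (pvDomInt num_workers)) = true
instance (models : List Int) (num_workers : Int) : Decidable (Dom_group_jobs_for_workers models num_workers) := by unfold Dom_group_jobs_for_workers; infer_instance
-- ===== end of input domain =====

-- B replaces A's three nested destructive pop(0) loops by a precomputed sizes list, one
-- enumeration of the models, and one slice per batch (objective: simpler one-pass decomposition).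
-- Both A and B empty the input list `models` in place (A by pop(0), B by clear()); the
-- equivalence proved here is about the RETURN value.

-- ===== PORT A =====
-- inner loop 'for i in range(cnt): batch.append([idx, models.pop(0)]); idx += 1'
-- (pop(0) on an empty list raises IndexError in Python; that case is excluded by Pre_,
-- here the recursion simply stops appending)
def gjwBatch : Nat → List Int → Int → (List (List Int) × List Int × Int)
  | 0, ms, idx => ([], ms, idx)
  | _+1, [], idx => ([], [], idx)
  | n+1, x :: ms, idx =>
      let r := gjwBatch n ms (idx + 1)
      ([idx, x] :: r.1, r.2.1, r.2.2)

-- 'for j in range(tail): …'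
def gjwTail : Nat → Nat → List Int → Int → (List (List (List Int)) × List Int × Int)
  | 0, _, ms, idx => ([], ms, idx)
  | j+1, sz, ms, idx =>
      let b := gjwBatch sz ms idx
      let r := gjwTail j sz b.2.1 b.2.2
      (b.1 :: r.1, r.2.1, r.2.2)

-- 'while len(models) > 0: …' with fuel = original length (each iteration pops ≥ 1 inside Pre_)
def gjwWhile : Nat → Nat → List Int → Int → List (List (List Int))
  | 0, _, _, _ => []
  | fuel+1, sz, ms, idx =>
      if ms.length > 0 then
        let b := gjwBatch sz ms idx
        b.1 :: gjwWhile fuel sz b.2.1 b.2.2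
      else []

def group_jobs_for_workers (models : List Int) (num_workers : Int) : List (List (List Int)) :=
  let batch_size := PySem.Int.floordiv (models.length : Int) num_workers
  let tail := (models.length : Int) - batch_size * num_workers
  let t := gjwTail tail.toNat (batch_size + 1).toNat models 0
  t.1 ++ gjwWhile models.length batch_size.toNat t.2.1 t.2.2

-- ===== PORT B =====
def group_jobs_for_workers_alt (models : List Int) (num_workers : Int) : List (List (List Int)) :=
  let batch_size := PySem.Int.floordiv (models.length : Int) num_workers
  let tail := (models.length : Int) - batch_size * num_workers
  let sizes := List.replicate tail.toNat (batch_size + 1) ++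
               List.replicate (num_workers - tail).toNat batch_size
  let indexed := (PySem.List.enumerate models 0).map (fun p => [p.1, p.2])
  let r := sizes.foldl
      (fun (st : List (List (List Int)) × Int) size =>
        (st.1 ++ [PySem.List.slice indexed (some st.2) (some (st.2 + size))], st.2 + size))
      (([] : List (List (List Int))), (0 : Int))
  r.1

-- ===== PRECONDITION & SPEC =====
-- Pre_ is exactly where the Python A returns normally: with 0 < num_workers ≤ len(models) all
-- pops are in range; otherwise A raises (AssertionError if num_workers > len(models),
-- ZeroDivisionError if num_workers = 0) or loops forever (num_workers < 0 with models ≠ []) —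
-- except models = [] with num_workers < 0, where A returns [] and is included.
def Pre_group_jobs_for_workers (models : List Int) (num_workers : Int) : Prop :=
  (0 < num_workers ∧ num_workers ≤ (models.length : Int)) ∨ (models = [] ∧ num_workers < 0)
instance (models : List Int) (num_workers : Int) : Decidable (Pre_group_jobs_for_workers models num_workers) := by unfold Pre_group_jobs_for_workers; infer_instance

def pvWitness_group_jobs_for_workers : List Int × Int := ([5, -3, 7, 0, 2], 2)

def Spec_group_jobs_for_workers (models : List Int) (num_workers : Int) (out : List (List (List Int))) : Prop := out = group_jobs_for_workers_alt models num_workers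
instance (models : List Int) (num_workers : Int) (out : List (List (List Int))) : Decidable (Spec_group_jobs_for_workers models num_workers out) := by unfold Spec_group_jobs_for_workers; infer_instance

-- ===== CLAIM (what is proved, stated in full; the proofs are below) =====
def Claim_equal_group_jobs_for_workers : Prop := ∀ (models : List Int) (num_workers : Int), Dom_group_jobs_for_workers models num_workers → Pre_group_jobs_for_workers models num_workers → Spec_group_jobs_for_workers models num_workers (group_jobs_for_workers models num_workers)

-- ===== LEMMAS AND PROOFS =====

-- reference shape: [[idx, x0], [idx+1, x1], …]
def pvMkB : Int → List Int → List (List Int)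
  | _, [] => []
  | idx, x :: xs => [idx, x] :: pvMkB (idx + 1) xs

-- reference chopping of ms into consecutive batches of the given sizes
def pvChop : List Nat → Int → List Int → List (List (List Int))
  | [], _, _ => []
  | s :: rest, idx, ms => pvMkB idx (ms.take s) :: pvChop rest (idx + s) (ms.drop s)

theorem gjwBatch_eq (sz : Nat) : ∀ (ms : List Int) (idx : Int), sz ≤ ms.length →
    gjwBatch sz ms idx = (pvMkB idx (ms.take sz), ms.drop sz, idx + sz) := by
  induction sz with
  | zero => intro ms idx _; simp [gjwBatch, pvMkB]
  | succ n ih =>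
      intro ms idx h
      cases ms with
      | nil => simp at h
      | cons x xs =>
          simp only [List.length_cons, Nat.succ_le_succ_iff] at h
          simp [gjwBatch, ih xs (idx + 1) h, pvMkB]
          ring

theorem gjwTail_eq (j : Nat) (sz : Nat) : ∀ (ms : List Int) (idx : Int), j * sz ≤ ms.length →
    gjwTail j sz ms idx =
      (pvChop (List.replicate j sz) idx ms, ms.drop (j * sz), idx + (j * sz : Nat)) := by
  induction j with
  | zero => intro ms idx _; simp [gjwTail, pvChop]
  | succ n ih =>
      intro ms idx h
      have hmul : (n + 1) * sz = sz + n * sz := by ring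
      have hsz : sz ≤ ms.length := by omega
      have hrest : n * sz ≤ (ms.drop sz).length := by
        simp only [List.length_drop]; omega
      simp only [gjwTail, gjwBatch_eq sz ms idx hsz, ih (ms.drop sz) (idx + sz) hrest]
      simp only [pvChop, List.drop_drop, List.replicate_succ, Prod.mk.injEq]
      exact ⟨trivial, by rw [hmul], by push_cast; ring⟩

theorem gjwWhile_eq (k : Nat) : ∀ (fuel sz : Nat) (ms : List Int) (idx : Int), 0 < sz →
    ms.length = k * sz → k ≤ fuel →
    gjwWhile fuel sz ms idx = pvChop (List.replicate k sz) idx ms := by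
  induction k with
  | zero =>
      intro fuel sz ms idx _ hlen _
      have : ms = [] := by simpa using List.length_eq_zero_iff.mp (by omega)
      subst this
      cases fuel <;> simp [gjwWhile, pvChop]
  | succ n ih =>
      intro fuel sz ms idx hsz hlen hfuel
      obtain ⟨f, rfl⟩ : ∃ f, fuel = f + 1 := ⟨fuel - 1, by omega⟩
      have hmul : (n + 1) * sz = sz + n * sz := by ring
      have hpos : 0 < ms.length := by omega
      have hszle : sz ≤ ms.length := by omega
      have hrest : (ms.drop sz).length = n * sz := by
        simp only [List.length_drop]; omega
      simp only [gjwWhile, if_pos hpos, gjwBatch_eq sz ms idx hszle,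
        ih f sz (ms.drop sz) (idx + sz) hsz hrest (by omega)]
      simp [pvChop, List.replicate_succ]

theorem pvChop_append (s1 s2 : List Nat) : ∀ (idx : Int) (ms : List Int),
    pvChop (s1 ++ s2) idx ms =
      pvChop s1 idx ms ++ pvChop s2 (idx + (s1.sum : Nat)) (ms.drop s1.sum) := by
  induction s1 with
  | nil => intro idx ms; simp [pvChop]
  | cons s rest ih =>
      intro idx ms
      simp [pvChop, ih, List.drop_drop]
      rw [add_assoc]

theorem pvMkB_drop (ms : List Int) : ∀ (i : Int) (k : Nat),
    (pvMkB i ms).drop k = pvMkB (i + k) (ms.drop k) := by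
  induction ms with
  | nil => intro i k; simp [pvMkB]
  | cons x xs ih =>
      intro i k
      cases k with
      | zero => simp
      | succ n =>
          simp [pvMkB, ih (i + 1) n]
          congr 1
          ring

theorem pvMkB_take (ms : List Int) : ∀ (i : Int) (k : Nat),
    (pvMkB i ms).take k = pvMkB i (ms.take k) := by
  induction ms with
  | nil => intro i k; simp [pvMkB]
  | cons x xs ih =>
      intro i k
      cases k with
      | zero => simp [pvMkB]
      | succ n => simp [pvMkB, ih (i + 1) n]

theorem enumerate_map_eq (ms : List Int) : ∀ (s : Int),
    (PySem.List.enumerate ms s).map (fun p => [p.1, p.2]) = pvMkB s ms := by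
  induction ms with
  | nil => intro s; simp [PySem.List.enumerate_nil, pvMkB]
  | cons x xs ih => intro s; simp [PySem.List.enumerate_cons, pvMkB, ih (s + 1)]

theorem slice_mkB (ms : List Int) (j k : Nat) :
    PySem.List.slice (pvMkB 0 ms) (some (j : Int)) (some ((j : Int) + (k : Int))) =
      pvMkB (j : Int) ((ms.drop j).take k) := by
  rw [PySem.List.slice_natCast_add, pvMkB_drop, pvMkB_take]
  simp

theorem foldB_eq (ms : List Int) (szs : List Int) : ∀ (j : Nat) (acc : List (List (List Int))),
    (∀ s ∈ szs, 0 ≤ s) →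
    (szs.foldl
      (fun (st : List (List (List Int)) × Int) size =>
        (st.1 ++ [PySem.List.slice (pvMkB 0 ms) (some st.2) (some (st.2 + size))], st.2 + size))
      (acc, (j : Int))).1
    = acc ++ pvChop (szs.map Int.toNat) (j : Int) (ms.drop j) := by
  induction szs with
  | nil => intro j acc _; simp [pvChop]
  | cons s rest ih =>
      intro j acc hnn
      have hs : 0 ≤ s := hnn s (by simp)
      have hcast : (j : Int) + s = ((j + s.toNat : Nat) : Int) := by push_cast; omega
      simp only [List.foldl_cons, hcast,
        ih (j + s.toNat) _ (fun x hx => hnn x (by simp [hx]))]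
      simp only [pvChop, List.map_cons, List.drop_drop, List.append_assoc, List.singleton_append]
      congr 2
      exact slice_mkB ms j s.toNat

theorem foldB_eq0 (ms : List Int) (szs : List Int) (hnn : ∀ s ∈ szs, 0 ≤ s) :
    (szs.foldl
      (fun (st : List (List (List Int)) × Int) size =>
        (st.1 ++ [PySem.List.slice (pvMkB 0 ms) (some st.2) (some (st.2 + size))], st.2 + size))
      (([] : List (List (List Int))), (0 : Int))).1
    = pvChop (szs.map Int.toNat) 0 ms := by
  have h := foldB_eq ms szs 0 [] hnn
  simpa using h

-- ===== VERDICT (by name: the statement is the Claim_ definition above) =====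
theorem group_jobs_for_workers_spec : Claim_equal_group_jobs_for_workers := by
  intro models num_workers _ hpre
  unfold Spec_group_jobs_for_workers
  rcases hpre with ⟨hpos, hle⟩ | ⟨hnil, hneg⟩
  · -- main case: 0 < num_workers ≤ len(models)
    unfold group_jobs_for_workers group_jobs_for_workers_alt
    dsimp only
    rw [enumerate_map_eq models 0]
    obtain ⟨bs, hbs⟩ : ∃ bs, PySem.Int.floordiv ((models.length : Int)) num_workers = bs := ⟨_, rfl⟩
    rw [hbs]
    have hid := PySem.Int.floordiv_mul_add_mod ((models.length : Int)) num_workers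
    rw [hbs] at hid
    have hm0 : 0 ≤ PySem.Int.mod ((models.length : Int)) num_workers := PySem.Int.mod_nonneg _ hpos
    have hmlt : PySem.Int.mod ((models.length : Int)) num_workers < num_workers := PySem.Int.mod_lt _ hpos
    have hbs1 : 1 ≤ bs := by
      rw [← hbs, PySem.Int.le_floordiv_iff_mul_le hpos]; omega
    have h1 : ((((models.length : Int) - bs * num_workers)).toNat : Int)
        = (models.length : Int) - bs * num_workers := by omega
    have h2 : (((bs + 1).toNat : Int)) = bs + 1 := by omega
    have h3 : (((num_workers - ((models.length : Int) - bs * num_workers)).toNat : Int))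
        = num_workers - ((models.length : Int) - bs * num_workers) := by omega
    have h4 : ((bs.toNat : Int)) = bs := by omega
    have htail_le : ((models.length : Int) - bs * num_workers).toNat * (bs + 1).toNat
        ≤ models.length := by
      zify
      rw [h1, h2]
      nlinarith [mul_nonneg (by omega : (0:Int) ≤ bs)
        (by omega : (0:Int) ≤ num_workers - ((models.length : Int) - bs * num_workers))]
    have hrem : (models.drop (((models.length : Int) - bs * num_workers).toNat * (bs + 1).toNat)).length
        = (num_workers - ((models.length : Int) - bs * num_workers)).toNat * bs.toNat := by
      simp only [List.length_drop]
      zify [htail_le]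
      rw [h1, h2, h3, h4]
      ring
    have hk_le : (num_workers - ((models.length : Int) - bs * num_workers)).toNat
        ≤ models.length := by
      nlinarith [mul_nonneg (by omega : (0:Int) ≤ bs - 1) (by omega : (0:Int) ≤ num_workers)]
    rw [gjwTail_eq _ _ _ _ htail_le]
    rw [gjwWhile_eq _ _ _ _ _ (by omega) hrem hk_le]
    rw [foldB_eq0 models _ ?hnn]
    case hnn =>
      intro s hs
      simp only [List.mem_append, List.mem_replicate] at hs
      rcases hs with ⟨_, rfl⟩ | ⟨_, rfl⟩ <;> omega
    rw [List.map_append, List.map_replicate, List.map_replicate]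
    rw [pvChop_append]
    dsimp only
    simp [List.sum_replicate, smul_eq_mul]
  · -- degenerate case included in Pre_: models = [] and num_workers < 0; both return []
    subst hnil
    have hz0 : PySem.Int.floordiv 0 num_workers = 0 := by
      simp [PySem.Int.floordiv, Int.zero_fdiv]
    unfold group_jobs_for_workers group_jobs_for_workers_alt
    dsimp only
    simp [hz0, gjwTail, gjwWhile, Int.toNat_of_nonpos (le_of_lt hneg)]
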